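-- pv_equiv track=rewrite | github.com/avocado-framework/avocado-presentations | kvmforum2017/examples/06_triangle_bad_input.py | triangle_check
-- ===== SOURCE A (Python) =====
-- def triangle_check(a, b, c):
--     try:
--         a = int(a)
--     except ValueError:
--         return "error"
--     try:
--         b = int(b)
--     except ValueError:
--         return "error"
--     try:
--         c = int(c)
--     except ValueError:
--         return "error"
--
--     if min([a, b, c]) <= 0:
--         return "error"
--
--     for (x, y, z) in [(a, b, c),   # covers (b, a, c)
--                       (a, c, b),   # covers (c, a, b)
--                       (b, c, a)]:  # covers (c, b, a)
--         if ((x + y) <= z):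
--             return "error"
--
--     unique_sides = set([a, b, c])
--     if len(unique_sides) == 1:
--         return "equilateral"
--     elif len(unique_sides) == 2:
--         return "isosceles"
--     else:
--         return "scalene"
-- ===== SOURCE B (Python) =====
-- def triangle_check(a, b, c):
--     sides = []
--     for v in (a, b, c):
--         try:
--             sides.append(int(v))
--         except ValueError:
--             return "error"
--     x, y, z = sorted(sides)
--     if x <= 0 or x + y <= z:
--         return "error"
--     if x == z:
--         return "equilateral"
--     if x == y or y == z:
--         return "isosceles"
--     return "scalene"
-- ===== Notes on version B (the rewrite author's own statement) =====
-- stated objective: simpler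
-- what changed: One conversion loop instead of three try blocks, then sort once and test only x<=0 and x+y<=z on the sorted triple (replacing the min() call and the three-permutation loop), classifying by comparing the sorted extremes instead of building a set.
import Mathlib
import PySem

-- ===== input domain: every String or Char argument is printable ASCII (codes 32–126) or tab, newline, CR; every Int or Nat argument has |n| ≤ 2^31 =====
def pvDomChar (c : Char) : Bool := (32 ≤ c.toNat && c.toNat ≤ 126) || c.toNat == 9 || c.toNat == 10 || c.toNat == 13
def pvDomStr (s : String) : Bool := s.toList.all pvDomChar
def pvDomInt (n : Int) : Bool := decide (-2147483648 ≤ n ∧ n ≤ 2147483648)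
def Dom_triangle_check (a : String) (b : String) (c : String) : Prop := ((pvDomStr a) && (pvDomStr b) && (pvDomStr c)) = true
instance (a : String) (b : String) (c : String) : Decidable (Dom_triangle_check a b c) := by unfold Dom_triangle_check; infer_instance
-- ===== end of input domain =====

-- B replaces the three try blocks by one conversion loop and the permutation loop by a single
-- sort-then-compare, classifying by the sorted extremes instead of a set (objective: simpler).

-- ===== PORT A =====
-- the for-loop over the three permutations, with its early 'return "error"'
def pvCheckPerms : List (Int × Int × Int) → Bool
  | [] => false
  | (x, y, z) :: rest => if x + y ≤ z then true else pvCheckPerms rest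

def triangle_check (a : String) (b : String) (c : String) : String :=
  match PySem.Int.ofStr? a with
  | none => "error"
  | some ai =>
    match PySem.Int.ofStr? b with
    | none => "error"
    | some bi =>
      match PySem.Int.ofStr? c with
      | none => "error"
      | some ci =>
        match PySem.List.min? [ai, bi, ci] (fun v => v) with
        | none => "error"  -- unreachable: the list literal is nonempty
        | some m =>
          if m ≤ 0 then "error"
          else if pvCheckPerms [(ai, bi, ci), (ai, ci, bi), (bi, ci, ai)] then "error"
          else
            let u := PySem.Set.ofList [ai, bi, ci]
            if PySem.Set.len u = 1 then "equilateral"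
            else if PySem.Set.len u = 2 then "isosceles"
            else "scalene"

-- ===== PORT B =====
-- the conversion loop with its early 'return "error"' (none = some int(v) raised ValueError)
def pvSides : List String → Option (List Int)
  | [] => some []
  | v :: rest =>
    match PySem.Int.ofStr? v with
    | none => none
    | some n => (pvSides rest).map (fun t => n :: t)

def triangle_check_alt (a : String) (b : String) (c : String) : String :=
  match pvSides [a, b, c] with
  | none => "error"
  | some sides =>
    match PySem.List.sorted sides (fun v => v) false with
    | [x, y, z] =>
      if x ≤ 0 ∨ x + y ≤ z then "error"
      else if x = z then "equilateral"
      else if x = y ∨ y = z then "isosceles"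
      else "scalene"
    | _ => "error"  -- unreachable: sides always has exactly three elements

-- ===== PRECONDITION & SPEC =====
def Spec_triangle_check (a : String) (b : String) (c : String) (out : String) : Prop := out = triangle_check_alt a b c
instance (a : String) (b : String) (c : String) (out : String) : Decidable (Spec_triangle_check a b c out) := by unfold Spec_triangle_check; infer_instance

-- ===== CLAIM (what is proved, stated in full; the proofs are below) =====
def Claim_equal_triangle_check : Prop := ∀ (a : String) (b : String) (c : String), Dom_triangle_check a b c → Spec_triangle_check a b c (triangle_check a b c)

-- ===== LEMMAS AND PROOFS =====

lemma sorted3 (x y z : Int) : PySem.List.sorted [x,y,z] (fun v => v) false =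
    if y < x then (if z < y then [z,y,x] else if z < x then [y,z,x] else [y,x,z])
    else (if z < x then [z,x,y] else if z < y then [x,z,y] else [x,y,z]) := by
  simp only [PySem.List.sorted_eq_foldl_insertBy, List.foldl, PySem.List.insertBy, decide_eq_true_eq]
  split_ifs <;> simp [PySem.List.insertBy] <;> split_ifs <;> first | rfl | omega

lemma min3 (x y z : Int) : PySem.List.min? [x,y,z] (fun v => v) = some (min (min x y) z) := by
  simp [PySem.List.min?_id_cons]

lemma perms3 (x y z : Int) :
    pvCheckPerms [(x,y,z),(x,z,y),(y,z,x)] = (decide (x+y ≤ z) || decide (x+z ≤ y) || decide (y+z ≤ x)) := by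
  simp only [pvCheckPerms]
  split_ifs <;> simp_all

lemma len3 (x y z : Int) : PySem.Set.len (PySem.Set.ofList [x,y,z]) =
    if x = y ∧ y = z then 1 else if x = y ∨ y = z ∨ x = z then 2 else 3 := by
  simp only [PySem.Set.len, PySem.Set.ofList, PySem.Set.add, PySem.Set.contains, List.foldl]
  split_ifs <;> simp_all <;> omega

lemma pv_body_eq (x y z : Int) :
    (match PySem.List.min? [x, y, z] (fun v => v) with
     | none => "error"
     | some m =>
       if m ≤ 0 then "error"
       else if pvCheckPerms [(x, y, z), (x, z, y), (y, z, x)] then "error"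
       else
         let u := PySem.Set.ofList [x, y, z]
         if PySem.Set.len u = 1 then "equilateral"
         else if PySem.Set.len u = 2 then "isosceles"
         else "scalene")
    =
    (match PySem.List.sorted [x, y, z] (fun v => v) false with
     | [p, q, r] =>
       if p ≤ 0 ∨ p + q ≤ r then "error"
       else if p = r then "equilateral"
       else if p = q ∨ q = r then "isosceles"
       else "scalene"
     | _ => "error") := by
  simp only [min3, perms3, len3, sorted3, Bool.or_eq_true, decide_eq_true_eq]
  split_ifs <;> intros <;> (try split_ifs) <;> (try omega) <;> (try rfl) <;>
    simp_all <;> (try omega) <;> (try split_ifs) <;> first | rfl | omega | simp_all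

-- ===== VERDICT (by name: the statement is the Claim_ definition above) =====
theorem triangle_check_spec : Claim_equal_triangle_check := by
  intro a b c _
  unfold Spec_triangle_check
  cases h1 : PySem.Int.ofStr? a <;> cases h2 : PySem.Int.ofStr? b <;> cases h3 : PySem.Int.ofStr? c <;>
    simp only [triangle_check, triangle_check_alt, pvSides, h1, h2, h3, Option.map] <;>
    first
      | rfl
      | exact pv_body_eq _ _ _
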